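-- pv_equiv track=rewrite | github.com/Hilyme/Python-Quantitative_Indicators | finance_utils/entangling_theory.py | TDX_FILTER
-- ===== SOURCE A (Python) =====
-- def TDX_FILTER(rec_list, n):
--     res_list = []
--     for i in range(len(rec_list)):
--         if i < n:
--             temp_n = i
--         else:
--             temp_n = n
--         if rec_list[i] and True not in res_list[i-temp_n:i]:
--             res_list.append(True)
--         else:
--             res_list.append(False)
--     return res_list
-- ===== SOURCE B (Python) =====
-- def TDX_FILTER(rec_list, n):
--     res = []
--     last = None  # index of the last True appended, O(1) window check
--     for i, v in enumerate(rec_list):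
--         window = i if i < n else n
--         keep = v and (last is None or last < i - window)
--         res.append(keep)
--         if keep:
--             last = i
--     return res
-- ===== Notes on version B (the rewrite author's own statement) =====
-- stated objective: faster
-- what changed: Replaced the per-step slice scan of the last n outputs by tracking the index of the last True appended, giving an O(1) window check per element.
import Mathlib
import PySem

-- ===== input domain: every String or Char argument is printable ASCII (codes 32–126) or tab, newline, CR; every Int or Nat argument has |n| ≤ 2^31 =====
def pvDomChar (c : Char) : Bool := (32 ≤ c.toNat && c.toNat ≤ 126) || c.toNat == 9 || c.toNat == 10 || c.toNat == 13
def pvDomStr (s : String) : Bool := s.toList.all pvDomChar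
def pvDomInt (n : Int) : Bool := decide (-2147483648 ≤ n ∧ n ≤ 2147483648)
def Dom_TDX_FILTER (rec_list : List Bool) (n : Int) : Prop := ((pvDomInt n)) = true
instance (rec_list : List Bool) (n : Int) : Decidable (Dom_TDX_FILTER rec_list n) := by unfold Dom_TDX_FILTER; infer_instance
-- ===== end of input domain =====

-- B replaces A's per-step slice scan of the last n outputs by tracking the index of the
-- last True appended (an O(1) window check per element): objective = faster.

-- ===== PORT A =====
def TDX_FILTER (rec_list : List Bool) (n : Int) : List Bool :=
  (PySem.List.pyRange 0 (rec_list.length : Int) 1).foldl (fun res_list i =>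
    let temp_n := if i < n then i else n
    if PySem.List.pyGetD rec_list i false
        && !((PySem.List.slice res_list (some (i - temp_n)) (some i)).contains true)
    then res_list ++ [true] else res_list ++ [false]) []

-- ===== PORT B =====
def TDX_FILTER_alt (rec_list : List Bool) (n : Int) : List Bool :=
  ((PySem.List.enumerate rec_list 0).foldl (fun (st : List Bool × Option Int) p =>
    let i := p.1
    let v := p.2
    let window := if i < n then i else n
    let keep := v && (match st.2 with
                      | none => true
                      | some last => decide (last < i - window))
    (st.1 ++ [keep], if keep then some i else st.2)) ([], none)).1

-- ===== PRECONDITION & SPEC =====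
def Spec_TDX_FILTER (rec_list : List Bool) (n : Int) (out : List Bool) : Prop := out = TDX_FILTER_alt rec_list n
instance (rec_list : List Bool) (n : Int) (out : List Bool) : Decidable (Spec_TDX_FILTER rec_list n out) := by unfold Spec_TDX_FILTER; infer_instance

-- ===== CLAIM (what is proved, stated in full; the proofs are below) =====
def Claim_equal_TDX_FILTER : Prop := ∀ (rec_list : List Bool) (n : Int), Dom_TDX_FILTER rec_list n → Spec_TDX_FILTER rec_list n (TDX_FILTER rec_list n)

-- ===== LEMMAS AND PROOFS =====

-- index of the last `true` in a list (proof-side characterisation of B's `last` state)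
def lastTrue (l : List Bool) : Option Int :=
  (PySem.List.enumerate l 0).foldl (fun acc p => if p.2 then some p.1 else acc) none

theorem lastTrue_append (l : List Bool) (b : Bool) :
    lastTrue (l ++ [b]) = if b then some (l.length : Int) else lastTrue l := by
  unfold lastTrue
  rw [PySem.List.enumerate_append, List.foldl_append]
  simp [PySem.List.enumerate_cons, PySem.List.enumerate_nil]

theorem lastTrue_lt_length (l : List Bool) (x : Int) (h : lastTrue l = some x) :
    0 ≤ x ∧ x < (l.length : Int) := by
  induction l using List.reverseRecOn with
  | nil => simp [lastTrue, PySem.List.enumerate_nil] at h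
  | append_singleton l b ih =>
    rw [lastTrue_append] at h
    by_cases hb : b = true
    · simp [hb] at h
      simp [List.length_append, ← h]
    · simp [hb] at h
      have := ih h
      simp [List.length_append]
      omega

theorem contains_drop_iff (l : List Bool) (k : Nat) :
    ((l.drop k).contains true = true) ↔ ∃ x, lastTrue l = some x ∧ (k : Int) ≤ x := by
  induction l using List.reverseRecOn with
  | nil => simp [lastTrue, PySem.List.enumerate_nil]
  | append_singleton l b ih =>
    rw [lastTrue_append]
    by_cases hk : k ≤ l.length
    · rw [List.drop_append_of_le_length hk]
      by_cases hb : b = true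
      · subst hb
        rw [if_pos rfl]
        constructor
        · intro _; exact ⟨(l.length : Int), rfl, by exact_mod_cast hk⟩
        · intro _; simp
      · have hb' : b = false := by cases b <;> simp_all
        subst hb'
        rw [if_neg Bool.false_ne_true]
        simpa [List.contains_append] using ih
    · have hlen : (l ++ [b]).length ≤ k := by simp; omega
      rw [List.drop_eq_nil_of_le hlen]
      simp only [List.contains_nil]
      constructor
      · intro h; simp at h
      · rintro ⟨x, hx, hkx⟩
        by_cases hb : b = true
        · simp [hb] at hx; omega
        · have hb' : b = false := by cases b <;> simp_all
          simp [hb'] at hx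
          have := lastTrue_lt_length l x hx
          omega

-- B's O(1) test against `lastTrue` equals A's scan of the slice res[m-w : m]
theorem keep_eq (res : List Bool) (mI w : Int) (hm : (res.length : Int) = mI)
    (hw : 0 ≤ mI - w) :
    (match lastTrue res with
     | none => true
     | some last => decide (last < mI - w))
    = !((PySem.List.slice res (some (mI - w)) (some mI)).contains true) := by
  have h0 : (0 : Int) ≤ mI := by omega
  rw [PySem.List.slice_toNat res hw h0]
  have htake : (res.drop (mI - w).toNat).take (mI.toNat - (mI - w).toNat)
      = res.drop (mI - w).toNat := by
    apply List.take_of_length_le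
    simp [List.length_drop]
    omega
  rw [htake]
  have hk : (((mI - w).toNat : Int)) = mI - w := Int.toNat_of_nonneg hw
  cases hl : lastTrue res with
  | none =>
    have hc : ¬ ((res.drop (mI - w).toNat).contains true = true) := by
      rw [contains_drop_iff]; simp [hl]
    simp_all
  | some last =>
    have hiff := contains_drop_iff res (mI - w).toNat
    rw [hl] at hiff
    by_cases hle : mI - w ≤ last
    · have hc : (res.drop (mI - w).toNat).contains true = true :=
        hiff.mpr ⟨last, rfl, by omega⟩
      rw [hc]
      simp
      omega
    · have hc : ¬ ((res.drop (mI - w).toNat).contains true = true) := by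
        intro h
        obtain ⟨x, hx, hkx⟩ := hiff.mp h
        cases hx
        omega
      rw [Bool.not_eq_true] at hc
      rw [hc]
      simp
      omega

theorem if_append_bool (A : List Bool) (c : Bool) :
    (if c = true then A ++ [true] else A ++ [false]) = A ++ [c] := by
  cases c <;> simp

-- peeling the last loop iteration off port A
theorem A_append (xs : List Bool) (x : Bool) (n : Int) :
    TDX_FILTER (xs ++ [x]) n =
      TDX_FILTER xs n ++
        [ x && !((PySem.List.slice (TDX_FILTER xs n)
            (some ((xs.length : Int) - (if (xs.length : Int) < n then (xs.length : Int) else n)))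
            (some (xs.length : Int))).contains true) ] := by
  unfold TDX_FILTER
  have hlen : (((xs ++ [x]).length : Nat) : Int) = (xs.length : Int) + 1 := by
    simp
  rw [hlen, PySem.List.pyRange_one_succ_right (by positivity), List.foldl_append]
  have hfold :
      List.foldl (fun res_list i =>
        let temp_n := if i < n then i else n
        if PySem.List.pyGetD (xs ++ [x]) i false
            && !((PySem.List.slice res_list (some (i - temp_n)) (some i)).contains true)
        then res_list ++ [true] else res_list ++ [false]) []
        (PySem.List.pyRange 0 (xs.length : Int))
      = List.foldl (fun res_list i =>
        let temp_n := if i < n then i else n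
        if PySem.List.pyGetD xs i false
            && !((PySem.List.slice res_list (some (i - temp_n)) (some i)).contains true)
        then res_list ++ [true] else res_list ++ [false]) []
        (PySem.List.pyRange 0 (xs.length : Int)) := by
    apply PySem.List.foldl_congr_mem
    intro acc i hi
    rw [PySem.List.mem_pyRange_one] at hi
    have hg : PySem.List.pyGetD (xs ++ [x]) i false = PySem.List.pyGetD xs i false := by
      rw [PySem.List.pyGetD_eq_getElem _ false hi.1 (by simp; omega),
          PySem.List.pyGetD_eq_getElem _ false hi.1 (by exact_mod_cast hi.2)]
      exact List.getElem_append_left _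
    simp only [hg]
  rw [hfold]
  have hx : PySem.List.pyGetD (xs ++ [x]) (xs.length : Int) false = x := by
    rw [PySem.List.pyGetD_eq_getElem _ false (by positivity) (by simp)]
    simp
  simp only [List.foldl_cons, List.foldl_nil]
  simp only [hx]
  exact if_append_bool _ _

theorem pair_eq (n : Int) (xs : List Bool) :
    ((PySem.List.enumerate xs 0).foldl (fun (st : List Bool × Option Int) p =>
      let i := p.1
      let v := p.2
      let window := if i < n then i else n
      let keep := v && (match st.2 with
                        | none => true
                        | some last => decide (last < i - window))
      (st.1 ++ [keep], if keep then some i else st.2)) ([], none))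
      = (TDX_FILTER xs n, lastTrue (TDX_FILTER xs n))
    ∧ (TDX_FILTER xs n).length = xs.length := by
  induction xs using List.reverseRecOn with
  | nil =>
    constructor
    · simp [PySem.List.enumerate_nil, TDX_FILTER, lastTrue]
    · simp [TDX_FILTER]
  | append_singleton xs x ih =>
    obtain ⟨h1, h2⟩ := ih
    rw [PySem.List.enumerate_append, List.foldl_append, h1]
    simp only [PySem.List.enumerate_cons, PySem.List.enumerate_nil, List.foldl_cons,
      List.foldl_nil, zero_add]
    have hw : 0 ≤ (xs.length : Int) - (if (xs.length : Int) < n then (xs.length : Int) else n) := by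
      by_cases h : (xs.length : Int) < n <;> simp [h]; omega
    have hkeep := keep_eq (TDX_FILTER xs n) (xs.length : Int)
      (if (xs.length : Int) < n then (xs.length : Int) else n) (by rw [h2]) hw
    rw [hkeep, A_append xs x n, lastTrue_append]
    constructor
    · rw [Prod.ext_iff]
      constructor
      · rfl
      · simp only [h2]
    · simp [h2]

-- ===== VERDICT (by name: the statement is the Claim_ definition above) =====
theorem TDX_FILTER_spec : Claim_equal_TDX_FILTER := by
  intro rec_list n _
  unfold Spec_TDX_FILTER TDX_FILTER_alt
  rw [(pair_eq n rec_list).1]
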